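-- pv_equiv track=rewrite | github.com/seungjaejeon/Algorithm | 프로그래머스/1/42840. 모의고사/모의고사.py | solution
-- ===== SOURCE A (Python) =====
-- def solution(answers):
--     answer = []
--     count = [0,0,0]
--     math1 = []
--     math2 = []
--     math3 = []
--     math2_example = [2,1,2,3,2,4,2,5]
--     math3_example = [3,3,1,1,2,2,4,4,5,5]
--     for i in range(len(answers)):
--         math1.append((i%5)+1)
--         math2.append(math2_example[(i%8)])
--         math3.append(math3_example[(i%10)])
--
--     for i in range(len(answers)):
--         if math1[i] == answers[i]:
--             count[0]+=1
--         if math2[i] == answers[i]: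
--             count[1]+=1
--         if math3[i] == answers[i]:
--             count[2]+=1
--     max_val = max(count)
--     for i in range(3):
--         if count[i]==max_val:
--             answer.append(i+1)
--     return answer
-- ===== SOURCE B (Python) =====
-- PATS = [[1, 2, 3, 4, 5],
--         [2, 1, 2, 3, 2, 4, 2, 5],
--         [3, 3, 1, 1, 2, 2, 4, 4, 5, 5]]
--
--
-- def solution(answers):
--     # One pattern-agnostic pass builds a frequency table keyed by
--     # (index mod 40, answer value); 40 = lcm of the pattern periods, so each
--     # pattern's score is then a fixed 40-term table-lookup sum.
--     freq = {}
--     for i, a in enumerate(answers):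
--         key = (i % 40, a)
--         freq[key] = freq.get(key, 0) + 1
--     scores = [sum(freq.get((r, p[r % len(p)]), 0) for r in range(40))
--               for p in PATS]
--     best = max(scores)
--     result = []
--     for k in range(3):
--         if scores[k] == best:
--             result.append(k + 1)
--     return result
-- ===== Notes on version B (the rewrite author's own statement) =====
-- stated objective: alternative
-- what changed: Instead of comparing each answer against all three patterns in an index loop (after materialising three per-index answer lists), B makes one pattern-agnostic pass building a frequency table keyed by (index mod 40, answer value) -- 40 = lcm of the pattern periods -- and reads each pattern's score off the table as a fixed 40-term lookup sum.
import Mathlib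
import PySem

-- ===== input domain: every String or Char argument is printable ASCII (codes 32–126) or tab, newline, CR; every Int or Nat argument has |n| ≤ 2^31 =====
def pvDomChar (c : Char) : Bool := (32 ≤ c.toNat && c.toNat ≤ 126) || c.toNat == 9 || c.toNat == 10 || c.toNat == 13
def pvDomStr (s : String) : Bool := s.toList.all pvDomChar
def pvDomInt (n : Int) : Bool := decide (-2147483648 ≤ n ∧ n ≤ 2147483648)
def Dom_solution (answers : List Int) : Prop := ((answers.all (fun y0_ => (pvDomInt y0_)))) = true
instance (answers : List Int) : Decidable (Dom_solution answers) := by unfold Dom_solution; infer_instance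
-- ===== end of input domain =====

-- B replaces A's per-index three-branch comparison loop by one pattern-agnostic pass that
-- builds a frequency table keyed by (index mod 40, answer); each score is a 40-term lookup sum.


-- ===== PORT A =====
-- count is the 3-element list [0,0,0] mutated only at the fixed indices 0,1,2: modelled
-- as a triple.  Indexing math2_example[i%8] / math3_example[i%10] / mathK[i] / answers[i]
-- is always in range (i ∈ range(len(answers)), i%8 < 8, i%10 < 10), so pyGetD's default
-- is never reached; max(count) is on a nonempty 3-element list, so max? is never none.
def solution (answers : List Int) : List Int :=
  let math2_example : List Int := [2, 1, 2, 3, 2, 4, 2, 5]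
  let math3_example : List Int := [3, 3, 1, 1, 2, 2, 4, 4, 5, 5]
  let maths :=
    (PySem.List.pyRange 0 (answers.length : Int)).foldl
      (fun (m : List Int × List Int × List Int) i =>
        (m.1 ++ [PySem.Int.mod i 5 + 1],
         m.2.1 ++ [PySem.List.pyGetD math2_example (PySem.Int.mod i 8) 0],
         m.2.2 ++ [PySem.List.pyGetD math3_example (PySem.Int.mod i 10) 0]))
      ([], [], [])
  let count :=
    (PySem.List.pyRange 0 (answers.length : Int)).foldl
      (fun (c : Int × Int × Int) i =>
        let c := if PySem.List.pyGetD maths.1 i 0 == PySem.List.pyGetD answers i 0 then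
                   (c.1 + 1, c.2.1, c.2.2) else c
        let c := if PySem.List.pyGetD maths.2.1 i 0 == PySem.List.pyGetD answers i 0 then
                   (c.1, c.2.1 + 1, c.2.2) else c
        if PySem.List.pyGetD maths.2.2 i 0 == PySem.List.pyGetD answers i 0 then
          (c.1, c.2.1, c.2.2 + 1) else c)
      ((0 : Int), (0 : Int), (0 : Int))
  let max_val := (PySem.List.max? [count.1, count.2.1, count.2.2] (fun x => x)).getD 0
  (PySem.List.pyRange 0 3).foldl
    (fun answer i =>
      if PySem.List.pyGetD [count.1, count.2.1, count.2.2] i 0 == max_val then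
        answer ++ [i + 1] else answer)
    []

-- ===== PORT B =====
-- p[r % len(p)] and answers-lookups are always in range, so pyGetD's default is never
-- reached; freq.get((r, v), 0) is exactly Dict.getD with default 0.
def pvPats : List (List Int) :=
  [[1, 2, 3, 4, 5], [2, 1, 2, 3, 2, 4, 2, 5], [3, 3, 1, 1, 2, 2, 4, 4, 5, 5]]

def solution_alt (answers : List Int) : List Int :=
  let freq :=
    (PySem.List.enumerate answers).foldl
      (fun (d : PySem.Dict (Int × Int) Int) ia =>
        let key := (PySem.Int.mod ia.1 40, ia.2)
        d.insert key (d.getD key 0 + 1))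
      PySem.Dict.empty
  let scores :=
    pvPats.map (fun p =>
      ((PySem.List.pyRange 0 40).map (fun r =>
        freq.getD (r, PySem.List.pyGetD p (PySem.Int.mod r (p.length : Int)) 0) 0)).sum)
  let best := (PySem.List.max? scores (fun x => x)).getD 0
  (PySem.List.pyRange 0 3).foldl
    (fun result k =>
      if PySem.List.pyGetD scores k 0 == best then result ++ [k + 1] else result)
    []

-- ===== PRECONDITION & SPEC =====
def Spec_solution (answers : List Int) (out : List Int) : Prop := out = solution_alt answers
instance (answers : List Int) (out : List Int) : Decidable (Spec_solution answers out) := by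
  unfold Spec_solution; infer_instance

-- ===== CLAIM (what is proved, stated in full; the proofs are below) =====
def Claim_equal_solution : Prop :=
  ∀ (answers : List Int), Dom_solution answers → Spec_solution answers (solution answers)

-- ===== LEMMAS AND PROOFS =====

-- canonical per-pattern predicate (A's orientation)
def pvP (answers pat : List Int) (i : Int) : Bool :=
  PySem.List.pyGetD pat (PySem.Int.mod i (pat.length : Int)) 0 == PySem.List.pyGetD answers i 0

-- ---- A side: the three loops in closed form ----
lemma pv_maths_eq (n : Int) :
    (PySem.List.pyRange 0 n).foldl
      (fun (m : List Int × List Int × List Int) i =>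
        (m.1 ++ [PySem.Int.mod i 5 + 1],
         m.2.1 ++ [PySem.List.pyGetD [2, 1, 2, 3, 2, 4, 2, 5] (PySem.Int.mod i 8) 0],
         m.2.2 ++ [PySem.List.pyGetD [3, 3, 1, 1, 2, 2, 4, 4, 5, 5] (PySem.Int.mod i 10) 0]))
      ([], [], [])
    = ((PySem.List.pyRange 0 n).map (fun i => PySem.Int.mod i 5 + 1),
       (PySem.List.pyRange 0 n).map
         (fun i => PySem.List.pyGetD [2, 1, 2, 3, 2, 4, 2, 5] (PySem.Int.mod i 8) 0),
       (PySem.List.pyRange 0 n).map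
         (fun i => PySem.List.pyGetD [3, 3, 1, 1, 2, 2, 4, 4, 5, 5] (PySem.Int.mod i 10) 0)) := by
  have h1 := PySem.List.foldl_prod_mk
      (fun (a : List Int) (i : Int) => a ++ [PySem.Int.mod i 5 + 1])
      (fun (b : List Int × List Int) (i : Int) =>
        (b.1 ++ [PySem.List.pyGetD [2, 1, 2, 3, 2, 4, 2, 5] (PySem.Int.mod i 8) 0],
         b.2 ++ [PySem.List.pyGetD [3, 3, 1, 1, 2, 2, 4, 4, 5, 5] (PySem.Int.mod i 10) 0]))
      (PySem.List.pyRange 0 n) [] ([], [])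
  have h2 := PySem.List.foldl_prod_mk
      (fun (a : List Int) (i : Int) =>
        a ++ [PySem.List.pyGetD [2, 1, 2, 3, 2, 4, 2, 5] (PySem.Int.mod i 8) 0])
      (fun (a : List Int) (i : Int) =>
        a ++ [PySem.List.pyGetD [3, 3, 1, 1, 2, 2, 4, 4, 5, 5] (PySem.Int.mod i 10) 0])
      (PySem.List.pyRange 0 n) [] []
  rw [h1, h2, PySem.List.foldl_append_singleton_eq_map,
      PySem.List.foldl_append_singleton_eq_map, PySem.List.foldl_append_singleton_eq_map]
  simp

-- pattern 1's cyclic table agrees with A's arithmetic form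
lemma pv_pat1 (i : Int) :
    PySem.List.pyGetD [1, 2, 3, 4, 5] (i % 5) 0 = i % 5 + 1 := by
  have h0 : 0 ≤ i % 5 := Int.emod_nonneg i (by norm_num)
  have h5 : i % 5 < 5 := Int.emod_lt_of_pos i (by norm_num)
  set m := i % 5 with hm
  interval_cases m <;> decide

-- the counting loop, in closed form
lemma pv_count_eq (answers : List Int) :
    (PySem.List.pyRange 0 (answers.length : Int)).foldl
      (fun (c : Int × Int × Int) i =>
        let c := if PySem.Int.mod i 5 + 1 == PySem.List.pyGetD answers i 0 then
                   (c.1 + 1, c.2.1, c.2.2) else c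
        let c := if PySem.List.pyGetD [2, 1, 2, 3, 2, 4, 2, 5] (PySem.Int.mod i 8) 0
                    == PySem.List.pyGetD answers i 0 then
                   (c.1, c.2.1 + 1, c.2.2) else c
        if PySem.List.pyGetD [3, 3, 1, 1, 2, 2, 4, 4, 5, 5] (PySem.Int.mod i 10) 0
            == PySem.List.pyGetD answers i 0 then
          (c.1, c.2.1, c.2.2 + 1) else c)
      ((0 : Int), (0 : Int), (0 : Int))
    = (((PySem.List.pyRange 0 (answers.length : Int)).countP
          (pvP answers [1, 2, 3, 4, 5]) : Int),
       ((PySem.List.pyRange 0 (answers.length : Int)).countP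
          (pvP answers [2, 1, 2, 3, 2, 4, 2, 5]) : Int),
       ((PySem.List.pyRange 0 (answers.length : Int)).countP
          (pvP answers [3, 3, 1, 1, 2, 2, 4, 4, 5, 5]) : Int)) := by
  rw [PySem.List.foldl_congr_mem _ _
    (fun (c : Int × Int × Int) i =>
      ((fun (a : Int) (i : Int) =>
          if pvP answers [1, 2, 3, 4, 5] i then a + 1 else a) c.1 i,
       (fun (b : Int × Int) (i : Int) =>
         ((fun (a : Int) (i : Int) =>
             if pvP answers [2, 1, 2, 3, 2, 4, 2, 5] i then a + 1 else a) b.1 i,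
          (fun (a : Int) (i : Int) =>
             if pvP answers [3, 3, 1, 1, 2, 2, 4, 4, 5, 5] i then a + 1 else a) b.2 i)) c.2 i))
    _ ?_]
  · have h1 := PySem.List.foldl_prod_mk
        (fun (a : Int) (i : Int) => if pvP answers [1, 2, 3, 4, 5] i then a + 1 else a)
        (fun (b : Int × Int) (i : Int) =>
          ((if pvP answers [2, 1, 2, 3, 2, 4, 2, 5] i then b.1 + 1 else b.1),
           (if pvP answers [3, 3, 1, 1, 2, 2, 4, 4, 5, 5] i then b.2 + 1 else b.2)))
        (PySem.List.pyRange 0 (answers.length : Int)) 0 (0, 0)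
    have h2 := PySem.List.foldl_prod_mk
        (fun (a : Int) (i : Int) => if pvP answers [2, 1, 2, 3, 2, 4, 2, 5] i then a + 1 else a)
        (fun (a : Int) (i : Int) => if pvP answers [3, 3, 1, 1, 2, 2, 4, 4, 5, 5] i then a + 1 else a)
        (PySem.List.pyRange 0 (answers.length : Int)) 0 0
    rw [h1, h2, PySem.List.foldl_if_add_one, PySem.List.foldl_if_add_one,
        PySem.List.foldl_if_add_one]
    simp
  · intro c i hi
    have e1 : pvP answers [1, 2, 3, 4, 5] i
        = (PySem.Int.mod i 5 + 1 == PySem.List.pyGetD answers i 0) := by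
      simp [pvP, pv_pat1 i]
    have e2 : pvP answers [2, 1, 2, 3, 2, 4, 2, 5] i
        = (PySem.List.pyGetD [2, 1, 2, 3, 2, 4, 2, 5] (PySem.Int.mod i 8) 0
            == PySem.List.pyGetD answers i 0) := by
      simp [pvP]
    have e3 : pvP answers [3, 3, 1, 1, 2, 2, 4, 4, 5, 5] i
        = (PySem.List.pyGetD [3, 3, 1, 1, 2, 2, 4, 4, 5, 5] (PySem.Int.mod i 10) 0
            == PySem.List.pyGetD answers i 0) := by
      simp [pvP]
    dsimp only
    simp only [e1, e2, e3]
    split_ifs <;> rfl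

lemma pv_solution_closed (answers : List Int) :
    solution answers =
      (let counts : List Int :=
        [((PySem.List.pyRange 0 (answers.length : Int)).countP
            (pvP answers [1, 2, 3, 4, 5]) : Int),
         ((PySem.List.pyRange 0 (answers.length : Int)).countP
            (pvP answers [2, 1, 2, 3, 2, 4, 2, 5]) : Int),
         ((PySem.List.pyRange 0 (answers.length : Int)).countP
            (pvP answers [3, 3, 1, 1, 2, 2, 4, 4, 5, 5]) : Int)]
       let best := (PySem.List.max? counts (fun x => x)).getD 0
       (PySem.List.pyRange 0 3).foldl
         (fun answer i =>
           if PySem.List.pyGetD counts i 0 == best then answer ++ [i + 1] else answer)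
         []) := by
  simp only [solution]
  rw [pv_maths_eq]
  dsimp only
  rw [PySem.List.foldl_congr_mem _ _
    (fun (c : Int × Int × Int) i =>
      let c := if PySem.Int.mod i 5 + 1 == PySem.List.pyGetD answers i 0 then
                 (c.1 + 1, c.2.1, c.2.2) else c
      let c := if PySem.List.pyGetD [2, 1, 2, 3, 2, 4, 2, 5] (PySem.Int.mod i 8) 0
                  == PySem.List.pyGetD answers i 0 then
                 (c.1, c.2.1 + 1, c.2.2) else c
      if PySem.List.pyGetD [3, 3, 1, 1, 2, 2, 4, 4, 5, 5] (PySem.Int.mod i 10) 0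
          == PySem.List.pyGetD answers i 0 then
        (c.1, c.2.1, c.2.2 + 1) else c)
    _ ?_]
  · rw [pv_count_eq]
  · intro c i hi
    have h0 : 0 ≤ i := (PySem.List.mem_pyRange_one.mp hi).1
    have hn : i < (answers.length : Int) := (PySem.List.mem_pyRange_one.mp hi).2
    dsimp only
    rw [PySem.List.pyGetD_map_pyRange_of_nonneg _ _ i _ h0 hn,
        PySem.List.pyGetD_map_pyRange_of_nonneg _ _ i _ h0 hn,
        PySem.List.pyGetD_map_pyRange_of_nonneg _ _ i _ h0 hn]

-- ---- B side: the frequency table computes the same three counts ----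

-- sum over distinct keys rs of the count of (r, v r) = one countP, when every key occurs in rs
lemma pv_sum_count_delta (rs : List Int) (hnd : rs.Nodup) (m a : Int) (hm : m ∈ rs)
    (v : Int → Int) :
    (rs.map (fun r => if ((m, a) : Int × Int) = (r, v r) then (1 : Int) else 0)).sum
      = if a = v m then (1 : Int) else 0 := by
  induction rs with
  | nil => cases hm
  | cons r0 rest ih =>
    rcases List.mem_cons.mp hm with h | h
    · subst h
      have hnotin : m ∉ rest := (List.nodup_cons.mp hnd).1
      have hz : (rest.map (fun r => if ((m, a) : Int × Int) = (r, v r) then (1 : Int) else 0)).sum = 0 := by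
        apply List.sum_eq_zero
        intro x hx
        rcases List.mem_map.mp hx with ⟨r, hr, rfl⟩
        have : ¬ ((m, a) : Int × Int) = (r, v r) := by
          intro he
          exact hnotin (by cases he; exact hr)
        simp [this]
      simp only [List.map_cons, List.sum_cons, hz, add_zero]
      by_cases hav : a = v m
      · simp [hav]
      · have : ¬ ((m, a) : Int × Int) = (m, v m) := by
          intro he; exact hav (congrArg Prod.snd he)
        simp [this, hav]
    · have hne : m ≠ r0 := by
        intro he; subst he; exact (List.nodup_cons.mp hnd).1 h
      have : ¬ ((m, a) : Int × Int) = (r0, v r0) := by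
        intro he; exact hne (congrArg Prod.fst he)
      simp only [List.map_cons, List.sum_cons, this, if_false, zero_add]
      exact ih (List.nodup_cons.mp hnd).2 h

lemma pv_sum_count (keyed : List (Int × Int)) (rs : List Int) (hnd : rs.Nodup)
    (hmem : ∀ x ∈ keyed, x.1 ∈ rs) (v : Int → Int) :
    (rs.map (fun r => ((keyed.count ((r, v r) : Int × Int)) : Int))).sum
      = ((keyed.countP (fun x => x.2 == v x.1)) : Int) := by
  induction keyed with
  | nil => simp
  | cons x t ih =>
    have hx : x.1 ∈ rs := hmem x List.mem_cons_self
    have hmem' : ∀ y ∈ t, y.1 ∈ rs := fun y hy => hmem y (List.mem_cons_of_mem _ hy)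
    have hcnt : ∀ r : Int,
        (((x :: t).count ((r, v r) : Int × Int)) : Int)
          = ((t.count ((r, v r) : Int × Int)) : Int)
            + (if (x : Int × Int) = (r, v r) then (1 : Int) else 0) := by
      intro r
      rw [List.count_cons]
      by_cases h : (x : Int × Int) = (r, v r)
      · simp [h]
      · simp [h]
    rw [List.map_congr_left (fun r _ => hcnt r), PySem.List.sum_map_add_int]
    rcases x with ⟨m, a⟩
    rw [pv_sum_count_delta rs hnd m a hx v, ih hmem']
    rw [List.countP_cons]
    by_cases h : a = v m
    · simp [h]
    · simp [h]

-- the score of one pattern p (with len(p) ∣ 40, 0 < len(p)) equals A's count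
lemma pv_score_eq (answers p : List Int) (hd : (p.length : Int) ∣ 40) (hp : 0 < p.length) :
    ((PySem.List.pyRange 0 40).map (fun r =>
        ((PySem.List.enumerate answers).foldl
          (fun (d : PySem.Dict (Int × Int) Int) ia =>
            let key := (PySem.Int.mod ia.1 40, ia.2)
            d.insert key (d.getD key 0 + 1))
          PySem.Dict.empty).getD
          (r, PySem.List.pyGetD p (PySem.Int.mod r (p.length : Int)) 0) 0)).sum
    = ((PySem.List.pyRange 0 (answers.length : Int)).countP (pvP answers p) : Int) := by
  have hgetD : ∀ k : Int × Int,
      ((PySem.List.enumerate answers).foldl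
        (fun (d : PySem.Dict (Int × Int) Int) ia =>
          let key := (PySem.Int.mod ia.1 40, ia.2)
          d.insert key (d.getD key 0 + 1))
        PySem.Dict.empty).getD k 0
      = ((((PySem.List.enumerate answers).map
            (fun ia => ((PySem.Int.mod ia.1 40, ia.2) : Int × Int))).count k) : Int) := by
    intro k
    rw [show ((PySem.List.enumerate answers).foldl
        (fun (d : PySem.Dict (Int × Int) Int) ia =>
          let key := (PySem.Int.mod ia.1 40, ia.2)
          d.insert key (d.getD key 0 + 1))
        PySem.Dict.empty)
      = (((PySem.List.enumerate answers).map
            (fun ia => ((PySem.Int.mod ia.1 40, ia.2) : Int × Int))).foldl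
          (fun (d : PySem.Dict (Int × Int) Int) x => d.insert x (d.getD x 0 + 1))
          PySem.Dict.empty) from by rw [List.foldl_map]]
    rw [PySem.Dict.getD_foldl_insert_add_one]
    simp
  simp only [hgetD]
  set keyed := (PySem.List.enumerate answers).map
      (fun ia => ((PySem.Int.mod ia.1 40, ia.2) : Int × Int)) with hkeyed
  have hnd : (PySem.List.pyRange 0 40).Nodup := by decide
  have hmem : ∀ x ∈ keyed, x.1 ∈ PySem.List.pyRange 0 40 := by
    intro x hx
    rcases List.mem_map.mp hx with ⟨ia, _, rfl⟩
    exact PySem.List.mem_pyRange_one.mpr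
      ⟨PySem.Int.mod_nonneg _ (by norm_num), PySem.Int.mod_lt _ (by norm_num)⟩
  rw [pv_sum_count keyed _ hnd hmem
      (fun r => PySem.List.pyGetD p (PySem.Int.mod r (p.length : Int)) 0)]
  rw [hkeyed, List.countP_map]
  rw [PySem.List.enumerate_eq_map_pyRange answers 0,
      show (PySem.List.len answers) = (answers.length : Int) from by simp [PySem.List.len_eq]]
  rw [List.countP_map]
  apply congrArg
  apply List.countP_congr
  intro j hj
  have h0 : 0 ≤ j := (PySem.List.mem_pyRange_one.mp hj).1
  have hmm : PySem.Int.mod (PySem.Int.mod j 40) (p.length : Int)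
      = PySem.Int.mod j (p.length : Int) := by
    have hL : (0 : Int) < (p.length : Int) := by exact_mod_cast hp
    rw [PySem.Int.mod_eq_emod_of_pos (by norm_num : (0:Int) < 40),
        PySem.Int.mod_eq_emod_of_pos hL, PySem.Int.mod_eq_emod_of_pos hL]
    exact Int.emod_emod_of_dvd j hd
  simp only [Function.comp, pvP, hmm]
  by_cases h : PySem.List.pyGetD answers j 0
      = PySem.List.pyGetD p (PySem.Int.mod j (p.length : Int)) 0
  · simp [h]
  · simp [h, Ne.symm h]

-- ===== VERDICT (by name: the statement is the Claim_ definition above) =====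
theorem solution_spec : Claim_equal_solution := by
  intro answers _
  unfold Spec_solution
  rw [pv_solution_closed]
  have h1 := pv_score_eq answers [1, 2, 3, 4, 5] (by decide) (by decide)
  have h2 := pv_score_eq answers [2, 1, 2, 3, 2, 4, 2, 5] (by decide) (by decide)
  have h3 := pv_score_eq answers [3, 3, 1, 1, 2, 2, 4, 4, 5, 5] (by decide) (by decide)
  simp only [solution_alt, pvPats, List.map, h1, h2, h3]
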